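-- pv_equiv track=rewrite | github.com/edytaroz/WDI | zad11wdi6.py | enki
-- ===== SOURCE A (Python) =====
-- def enki(tab,x,i,ilo):
--     if i == len(tab):
--         if ilo == x:
--             return 1
--         else:
--             return 0
--     else:
--         return enki(tab,x,i+1,ilo) + enki(tab,x,i+1,ilo*tab[i])
-- ===== SOURCE B (Python) =====
-- def enki(tab, x, i, ilo):
--     # meet-in-the-middle over the elements tab[i], ..., tab[len(tab)-1]
--     vals = [tab[j] for j in range(i, len(tab))]
--     h = len(vals) // 2
--     lprods = [1]
--     for v in vals[:h]:
--         lprods += [p * v for p in lprods]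
--     rprods = [1]
--     for v in vals[h:]:
--         rprods += [p * v for p in rprods]
--     cnt = {}
--     for p in lprods:
--         k = ilo * p
--         cnt[k] = cnt.get(k, 0) + 1
--     total = 0
--     for q in rprods:
--         if q == 0:
--             if x == 0:
--                 total += len(lprods)
--         elif x % q == 0:
--             total += cnt.get(x // q, 0)
--     return total
-- ===== Notes on version B (the rewrite author's own statement) =====
-- stated objective: faster
-- what changed: Replaces the binary include/exclude recursion over all 2^n subsets by meet-in-the-middle: enumerate the subset products of each half iteratively, hash the left half's products (times ilo) in a counter, and for each right-half product count the matching left products by exact division; intended as faster (O(2^(n/2)) vs O(2^n)); a timing run could not confirm it at the largest sizes, where both enumerations are exponential and time out.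
import Mathlib
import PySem

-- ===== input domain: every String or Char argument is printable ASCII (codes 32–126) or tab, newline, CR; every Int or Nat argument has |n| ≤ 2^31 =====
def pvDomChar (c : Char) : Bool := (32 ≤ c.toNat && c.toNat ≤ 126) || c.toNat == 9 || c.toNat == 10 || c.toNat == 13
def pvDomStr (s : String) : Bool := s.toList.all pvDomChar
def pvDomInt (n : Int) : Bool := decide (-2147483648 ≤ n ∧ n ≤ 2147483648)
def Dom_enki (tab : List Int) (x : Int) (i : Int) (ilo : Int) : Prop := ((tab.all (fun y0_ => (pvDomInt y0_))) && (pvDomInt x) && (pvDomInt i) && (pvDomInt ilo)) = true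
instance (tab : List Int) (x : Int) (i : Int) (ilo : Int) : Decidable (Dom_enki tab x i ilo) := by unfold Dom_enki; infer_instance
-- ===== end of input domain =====

-- B replaces A's 2^n include/exclude recursion by meet-in-the-middle over the two halves,
-- hashing the left half's products in a counter; intended as faster (O(2^(n/2)) vs O(2^n)
-- subset enumerations; a timing run could not confirm this at the largest sizes, where both time out).

-- ===== PORT A =====
-- A recurses on the index; the recursion stops when i reaches len(tab), and reads tab[i]
-- (Python indexing, negative i wraps) otherwise.  Where Python raises (tab[i] out of range,
-- pyGet? = none) the port returns 0; those inputs are excluded by Pre_enki.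
def enki (tab : List Int) (x : Int) (i : Int) (ilo : Int) : Int :=
  if i = (tab.length : Int) then (if ilo = x then 1 else 0)
  else
    match hg : PySem.List.pyGet? tab i with
    | none => 0
    | some v => enki tab x (i + 1) ilo + enki tab x (i + 1) (ilo * v)
termination_by ((tab.length : Int) - i).toNat
decreasing_by
  all_goals
    have hin : PySem.Raise.InRange tab.length i := by
      by_contra hc
      rw [← PySem.List.pyGet?_eq_none_iff] at hc
      simp [hc] at hg
    unfold PySem.Raise.InRange at hin
    omega

-- ===== PORT B =====
-- the values tab[i], …, tab[len-1] (Python indexing; default 0 is never used under Pre_enki)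
def pvVals (tab : List Int) (i : Int) : List Int :=
  (PySem.List.pyRange i (tab.length : Int) 1).map (fun j => (PySem.List.pyGet? tab j).getD 0)

-- one step of the iterative subset-product enumeration: ps += [p * v for p in ps]
def pvProdStep (ps : List Int) (v : Int) : List Int := ps ++ ps.map (fun p => p * v)

def enki_alt (tab : List Int) (x : Int) (i : Int) (ilo : Int) : Int :=
  let vals := pvVals tab i
  let h : Int := PySem.Int.floordiv (vals.length : Int) 2
  let lprods := (PySem.List.slice vals none (some h)).foldl pvProdStep [1]
  let rprods := (PySem.List.slice vals (some h) none).foldl pvProdStep [1]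
  let cnt := lprods.foldl
    (fun d p => d.insert (ilo * p) (d.getD (ilo * p) 0 + 1)) (PySem.Dict.empty : PySem.Dict Int Int)
  rprods.foldl
    (fun total q =>
      if q = 0 then (if x = 0 then total + (lprods.length : Int) else total)
      else if PySem.Int.mod x q = 0 then total + cnt.getD (PySem.Int.floordiv x q) 0
      else total) 0

-- ===== PRECONDITION & SPEC =====
-- Pre_ excludes exactly the start indices i outside [-len(tab), len(tab)], where A raises
-- (IndexError on tab[i], or RecursionError for i past the end).
def Pre_enki (tab : List Int) (x : Int) (i : Int) (ilo : Int) : Prop :=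
  -(tab.length : Int) ≤ i ∧ i ≤ (tab.length : Int)
instance (tab : List Int) (x : Int) (i : Int) (ilo : Int) : Decidable (Pre_enki tab x i ilo) := by
  unfold Pre_enki; infer_instance
def pvWitness_enki : List Int × Int × Int × Int := ([2, 3], 6, 0, 1)
def Spec_enki (tab : List Int) (x : Int) (i : Int) (ilo : Int) (out : Int) : Prop := out = enki_alt tab x i ilo
instance (tab : List Int) (x : Int) (i : Int) (ilo : Int) (out : Int) : Decidable (Spec_enki tab x i ilo out) := by unfold Spec_enki; infer_instance

-- ===== CLAIM (what is proved, stated in full; the proofs are below) =====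
def Claim_equal_enki : Prop := ∀ (tab : List Int) (x : Int) (i : Int) (ilo : Int), Dom_enki tab x i ilo → Pre_enki tab x i ilo → Spec_enki tab x i ilo (enki tab x i ilo)

-- ===== LEMMAS AND PROOFS =====

-- the mathematical count A computes, as structural recursion over the list of values
def enkiL (vs : List Int) (x : Int) (ilo : Int) : Int :=
  match vs with
  | [] => if ilo = x then 1 else 0
  | v :: rest => enkiL rest x ilo + enkiL rest x (ilo * v)

theorem pvVals_nil (tab : List Int) (i : Int) (h : (tab.length : Int) ≤ i) :
    pvVals tab i = [] := by
  simp [pvVals, PySem.List.pyRange_one_eq_nil h]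

theorem pvVals_cons (tab : List Int) (i : Int) (h : i < (tab.length : Int)) :
    pvVals tab i = (PySem.List.pyGet? tab i).getD 0 :: pvVals tab (i + 1) := by
  simp [pvVals, PySem.List.pyRange_one_cons h]

-- A equals enkiL on its value list
theorem enki_eq_enkiL (tab : List Int) (x : Int) :
    ∀ (i ilo : Int), -(tab.length : Int) ≤ i → i ≤ (tab.length : Int) →
      enki tab x i ilo = enkiL (pvVals tab i) x ilo := by
  have key : ∀ (n : Nat) (i ilo : Int), ((tab.length : Int) - i).toNat = n →
      -(tab.length : Int) ≤ i → i ≤ (tab.length : Int) →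
      enki tab x i ilo = enkiL (pvVals tab i) x ilo := by
    intro n
    induction n with
    | zero =>
      intro i ilo hn h1 h2
      have hi : i = (tab.length : Int) := by omega
      rw [enki]
      subst hi
      rw [pvVals_nil tab _ le_rfl]
      simp [enkiL]
    | succ n ih =>
      intro i ilo hn h1 h2
      have hi : i < (tab.length : Int) := by omega
      obtain ⟨v, hv⟩ : ∃ v, PySem.List.pyGet? tab i = some v := by
        cases h : PySem.List.pyGet? tab i with
        | none =>
          rw [PySem.List.pyGet?_eq_none_iff] at h
          exact absurd (by unfold PySem.Raise.InRange; omega) h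
        | some v => exact ⟨v, rfl⟩
      rw [enki]
      rw [if_neg (by omega), hv]
      rw [pvVals_cons tab i hi, hv]
      simp only [Option.getD_some, enkiL]
      rw [ih (i + 1) ilo (by omega) (by omega) (by omega),
          ih (i + 1) (ilo * v) (by omega) (by omega) (by omega)]
  exact fun i ilo h1 h2 => key _ i ilo rfl h1 h2

-- small sum helpers
theorem sum_map_add (l : List Int) (f g : Int → Int) :
    (l.map (fun a => f a + g a)).sum = (l.map f).sum + (l.map g).sum := by
  induction l with
  | nil => simp
  | cons a l ih => simp [ih]; ring

theorem sum_indicator_count (l : List Int) (c : Int) :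
    (l.map (fun p => if p = c then (1 : Int) else 0)).sum = (l.count c : Int) := by
  induction l with
  | nil => simp
  | cons a l ih =>
    by_cases h : a = c
    · simp [h, ih]
      ring
    · simp [h, ih]

-- master sum lemma for the iterative product enumeration
theorem foldl_prodStep_sum (x : Int) :
    ∀ (vs : List Int) (ps : List Int) (ilo : Int),
      ((vs.foldl pvProdStep ps).map (fun p => if ilo * p = x then (1 : Int) else 0)).sum
        = (ps.map (fun p => enkiL vs x (ilo * p))).sum := by
  intro vs
  induction vs with
  | nil => intro ps ilo; simp [enkiL]
  | cons v vs ih =>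
    intro ps ilo
    simp only [List.foldl_cons]
    rw [ih (pvProdStep ps v) ilo]
    unfold pvProdStep
    rw [List.map_append, List.sum_append, List.map_map]
    simp only [enkiL, Function.comp_def, mul_assoc]
    rw [sum_map_add]

theorem enkiL_eq_sum (vs : List Int) (x ilo : Int) :
    enkiL vs x ilo
      = ((vs.foldl pvProdStep [1]).map (fun p => if ilo * p = x then (1 : Int) else 0)).sum := by
  rw [foldl_prodStep_sum x vs [1] ilo]
  simp

theorem sum_comm_list (L R : List Int) (f : Int → Int → Int) :
    (L.map (fun a => (R.map (fun b => f a b)).sum)).sum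
      = (R.map (fun b => (L.map (fun a => f a b)).sum)).sum := by
  induction L with
  | nil => simp
  | cons a L ih => simp only [List.map_cons, List.sum_cons, ih, sum_map_add]

-- B's second loop as a sum over the right-half products
theorem loop_sum (x len : Int) (cnt : PySem.Dict Int Int) :
    ∀ (rl : List Int) (t : Int),
      rl.foldl (fun total q =>
          if q = 0 then (if x = 0 then total + len else total)
          else if PySem.Int.mod x q = 0 then total + cnt.getD (PySem.Int.floordiv x q) 0
          else total) t
        = t + (rl.map (fun q =>
            if q = 0 then (if x = 0 then len else 0)
            else if PySem.Int.mod x q = 0 then cnt.getD (PySem.Int.floordiv x q) 0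
            else 0)).sum := by
  intro rl
  induction rl with
  | nil => intro t; simp
  | cons q rl ih =>
    intro t
    rw [List.foldl_cons, ih]
    simp only [List.map_cons, List.sum_cons]
    split_ifs <;> ring

-- the per-q branch of B counts exactly the matching left products
theorem branch_eq_sum (x ilo : Int) (lp : List Int) (q : Int) :
    (if q = 0 then (if x = 0 then ((lp.length : Int)) else 0)
     else if PySem.Int.mod x q = 0 then
       (PySem.Dict.counter (lp.map (fun p => ilo * p))).getD (PySem.Int.floordiv x q) 0
     else 0)
      = (lp.map (fun p => if ilo * p * q = x then (1 : Int) else 0)).sum := by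
  by_cases hq : q = 0
  · subst hq
    by_cases hx : x = 0
    · subst hx
      simp
    · simp [hx, Ne.symm hx]
  · rw [if_neg hq]
    by_cases hdvd : PySem.Int.mod x q = 0
    · rw [if_pos hdvd, PySem.Dict.getD_counter]
      have hq' : (PySem.Int.floordiv x q) * q = x := by
        have h := PySem.Int.floordiv_mul_add_mod x q
        rw [hdvd, add_zero] at h
        exact h
      have hmap : (lp.map (fun p => if ilo * p * q = x then (1 : Int) else 0))
          = lp.map (fun p => if ilo * p = PySem.Int.floordiv x q then (1 : Int) else 0) := by
        congr 1
        funext p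
        congr 1
        simp only [eq_iff_iff]
        constructor
        · intro h; exact mul_right_cancel₀ hq (by rw [h, hq'])
        · intro h; rw [h, hq']
      have hmm : (lp.map (fun p => if ilo * p = PySem.Int.floordiv x q then (1 : Int) else 0))
          = ((lp.map (fun p => ilo * p)).map
              (fun y => if y = PySem.Int.floordiv x q then (1 : Int) else 0)) := by
        simp [List.map_map, Function.comp_def]
      rw [hmap, hmm, sum_indicator_count]
    · rw [if_neg hdvd]
      have hnone : ∀ p : Int, ¬ (ilo * p * q = x) := by
        intro p h
        apply hdvd
        rw [PySem.Int.mod_eq_zero_iff_dvd]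
        exact ⟨ilo * p, by rw [← h]; ring⟩
      simp [hnone]

theorem enki_alt_eq (tab : List Int) (x i ilo : Int) :
    enki_alt tab x i ilo = enkiL (pvVals tab i) x ilo := by
  have hfd : PySem.Int.floordiv ((pvVals tab i).length : Int) 2
      = (((pvVals tab i).length / 2 : Nat) : Int) := by
    exact_mod_cast PySem.Int.floordiv_natCast (pvVals tab i).length 2
  have hcnt : ∀ lp : List Int,
      lp.foldl (fun d p => d.insert (ilo * p) (d.getD (ilo * p) 0 + 1))
        (PySem.Dict.empty : PySem.Dict Int Int)
      = PySem.Dict.counter (lp.map (fun p => ilo * p)) := by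
    intro lp
    rw [← PySem.Dict.foldl_insert_getD_add_one_eq_counter, List.foldl_map]
  simp only [enki_alt, hfd, PySem.List.slice_to_natCast, PySem.List.slice_from_natCast]
  rw [hcnt]
  rw [loop_sum, zero_add]
  have hsplit : pvVals tab i
      = (pvVals tab i).take ((pvVals tab i).length / 2)
        ++ (pvVals tab i).drop ((pvVals tab i).length / 2) := (List.take_append_drop _ _).symm
  conv_rhs => rw [hsplit]
  rw [enkiL_eq_sum, List.foldl_append, foldl_prodStep_sum]
  simp only [enkiL_eq_sum]
  rw [sum_comm_list _ _ (fun p q => if ilo * p * q = x then (1 : Int) else 0)]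
  congr 1
  apply List.map_congr_left
  intro q _
  exact branch_eq_sum x ilo _ q

-- ===== VERDICT (by name: the statement is the Claim_ definition above) =====
theorem enki_spec : Claim_equal_enki := by
  intro tab x i ilo _ hpre
  unfold Spec_enki
  rw [enki_alt_eq, enki_eq_enkiL tab x i ilo hpre.1 hpre.2]
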